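-- pv_equiv track=rewrite | github.com/MrBrantCode/unitest_baseline | mut_generate/mist_train_cf/cf_4498/solution.py | sum_of_squares_prime_numbers
-- ===== SOURCE A (Python) =====
-- from typing import List
--
-- def sum_of_squares_prime_numbers(numbers: List[int]) -> int:
--     def is_prime(number: int) -> bool:
--         if number < 2:
--             return False
--         for i in range(2, int(number ** 0.5) + 1):
--             if number % i == 0:
--                 return False
--         return True
--
--     sum_of_squares = 0
--     for number in numbers:
--         if is_prime(number) and number % 3 != 0 and number % 5 != 0:
--             sum_of_squares += number ** 2
--
--     return sum_of_squares
-- ===== SOURCE B (Python) =====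
-- from typing import List
--
-- def sum_of_squares_prime_numbers(numbers: List[int]) -> int:
--     # Precompute the primes up to isqrt(max(numbers)) once; every value is then
--     # tested by dividing only by those primes (instead of by every integer up to its sqrt).
--     def passes(n: int, primes: List[int]) -> bool:
--         for p in primes:
--             if p * p > n:
--                 break
--             if n % p == 0:
--                 return False
--         return True
--
--     m = max(numbers, default=0)
--     if m < 2:
--         return 0
--     r = 1
--     while (r + 1) * (r + 1) <= m:
--         r += 1
--     primes: List[int] = []
--     for c in range(2, r + 1):
--         if passes(c, primes):
--             primes.append(c)
--     total = 0
--     for n in numbers: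
--         if n >= 2 and n % 3 != 0 and n % 5 != 0 and passes(n, primes):
--             total += n * n
--     return total
-- ===== Notes on version B (the rewrite author's own statement) =====
-- stated objective: faster
-- what changed: Instead of trial-dividing each element by every integer up to its square root, B computes the primes up to isqrt(max(numbers)) once and tests each element by dividing only by those primes (breaking once p*p exceeds the element).
import Mathlib
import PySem

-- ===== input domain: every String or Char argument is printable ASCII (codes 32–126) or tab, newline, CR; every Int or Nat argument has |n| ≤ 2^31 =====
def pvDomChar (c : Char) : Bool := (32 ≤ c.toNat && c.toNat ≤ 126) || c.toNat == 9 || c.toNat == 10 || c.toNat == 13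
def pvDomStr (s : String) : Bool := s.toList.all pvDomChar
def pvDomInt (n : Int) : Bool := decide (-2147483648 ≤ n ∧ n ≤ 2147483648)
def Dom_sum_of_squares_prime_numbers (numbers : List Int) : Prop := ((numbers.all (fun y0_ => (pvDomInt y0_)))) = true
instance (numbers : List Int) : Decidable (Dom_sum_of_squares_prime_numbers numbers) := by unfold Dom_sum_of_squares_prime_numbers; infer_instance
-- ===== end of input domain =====

-- B replaces A's per-element trial division by every integer up to sqrt(n) with a prime
-- list precomputed once up to isqrt(max(numbers)); elements are divided by those primes only.


-- ===== PORT A =====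
-- is_prime: `int(number ** 0.5)` is the exact integer square root on the domain |n| ≤ 2^31
-- (float sqrt is exact there), ported as Nat.sqrt; the early-return loop is `all`.
def pvIsPrimeA (number : Int) : Bool :=
  if number < 2 then false
  else
    (PySem.List.pyRange 2 ((Nat.sqrt number.toNat : Int) + 1) 1).all
      (fun i => !(PySem.Int.mod number i == 0))

def sum_of_squares_prime_numbers (numbers : List Int) : Int :=
  numbers.foldl
    (fun sum_of_squares number =>
      if pvIsPrimeA number && !(PySem.Int.mod number 3 == 0) && !(PySem.Int.mod number 5 == 0)
      then sum_of_squares + number ^ 2 else sum_of_squares) 0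

-- ===== PORT B =====
-- passes: `for p in primes: if p*p > n: break; if n % p == 0: return False` `return True`
def pvPasses (n : Int) (primes : List Int) : Bool :=
  match primes with
  | [] => true
  | p :: rest =>
    if p * p > n then true
    else if PySem.Int.mod n p == 0 then false
    else pvPasses n rest

-- `r = 1` ; `while (r+1)*(r+1) <= m: r += 1`
def pvIsqrtLoop (m r : Int) : Int :=
  if (r + 1) * (r + 1) ≤ m then pvIsqrtLoop m (r + 1) else r
termination_by (m - r).toNat
decreasing_by
  rename_i h
  have h2 : r < m := by nlinarith [sq_nonneg (2 * r + 1)]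
  omega

def sum_of_squares_prime_numbers_alt (numbers : List Int) : Int :=
  let m := match PySem.List.max? numbers (fun x => x) with | some v => v | none => 0
  if m < 2 then 0
  else
    let r := pvIsqrtLoop m 1
    let primes := (PySem.List.pyRange 2 (r + 1) 1).foldl
      (fun primes c => if pvPasses c primes then primes ++ [c] else primes) []
    numbers.foldl
      (fun total n =>
        if decide (n ≥ 2) && !(PySem.Int.mod n 3 == 0) && !(PySem.Int.mod n 5 == 0)
            && pvPasses n primes
        then total + n * n else total) 0

-- ===== PRECONDITION & SPEC =====
def Spec_sum_of_squares_prime_numbers (numbers : List Int) (out : Int) : Prop := out = sum_of_squares_prime_numbers_alt numbers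
instance (numbers : List Int) (out : Int) : Decidable (Spec_sum_of_squares_prime_numbers numbers out) := by unfold Spec_sum_of_squares_prime_numbers; infer_instance

-- ===== CLAIM (what is proved, stated in full; the proofs are below) =====
def Claim_equal_sum_of_squares_prime_numbers : Prop := ∀ (numbers : List Int), Dom_sum_of_squares_prime_numbers numbers → Spec_sum_of_squares_prime_numbers numbers (sum_of_squares_prime_numbers numbers)

-- ===== LEMMAS AND PROOFS =====

-- "passes trial division": no divisor d with 2 ≤ d and d*d ≤ n
def pvTD (n : Int) : Prop := ∀ d : Int, 2 ≤ d → d * d ≤ n → ¬ d ∣ n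

-- d*d ≤ n ↔ d ≤ isqrt n, for 0 ≤ d, 0 ≤ n
theorem pv_sq_le_iff (n d : Int) (hn : 0 ≤ n) (hd : 0 ≤ d) :
    d * d ≤ n ↔ d ≤ (Nat.sqrt n.toNat : Int) := by
  have h1 : d ≤ (Nat.sqrt n.toNat : Int) ↔ d.toNat ≤ Nat.sqrt n.toNat := by omega
  have h2 : ((d.toNat * d.toNat : Nat) : Int) = d * d := by
    push_cast; rw [Int.toNat_of_nonneg hd]
  rw [h1, Nat.le_sqrt]
  omega

theorem pvIsPrimeA_eq (n : Int) (h2 : 2 ≤ n) : pvIsPrimeA n = true ↔ pvTD n := by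
  rw [pvIsPrimeA, if_neg (by omega)]
  rw [List.all_eq_true]
  constructor
  · intro h d hd hdd
    have hmem : d ∈ PySem.List.pyRange 2 ((Nat.sqrt n.toNat : Int) + 1) 1 := by
      rw [PySem.List.mem_pyRange_one]
      have := (pv_sq_le_iff n d (by omega) (by omega)).mp hdd
      omega
    have := h d hmem
    simp only [Bool.not_eq_eq_eq_not, Bool.not_true, beq_eq_false_iff_ne] at this
    rw [← PySem.Int.mod_eq_zero_iff_dvd]
    exact this
  · intro h i hi
    rw [PySem.List.mem_pyRange_one] at hi
    have hdd : i * i ≤ n := (pv_sq_le_iff n i (by omega) (by omega)).mpr (by omega)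
    have := h i (by omega) hdd
    simp only [Bool.not_eq_eq_eq_not, Bool.not_true, beq_eq_false_iff_ne]
    rw [← PySem.Int.mod_eq_zero_iff_dvd] at this
    exact this

theorem pvIsPrimeA_lt (n : Int) (h : n < 2) : pvIsPrimeA n = false := by
  simp [pvIsPrimeA, h]

theorem pvIsqrtLoop_eq (m : Int) : ∀ r : Int, 0 ≤ r → r * r ≤ m →
    pvIsqrtLoop m r = (Nat.sqrt m.toNat : Int) := by
  intro r
  fun_induction pvIsqrtLoop m r with
  | case1 r h ih => intro hr hm; exact ih (by omega) h
  | case2 r h =>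
    intro hr hm
    have hmn : 0 ≤ m := le_trans (mul_self_nonneg r) hm
    have h1 : r ≤ (Nat.sqrt m.toNat : Int) := (pv_sq_le_iff m r hmn hr).mp hm
    have h2 : ¬ (r + 1 ≤ (Nat.sqrt m.toNat : Int)) := by
      intro hle
      exact h ((pv_sq_le_iff m (r+1) hmn (by omega)).mpr hle)
    omega

-- passes = true when n survives full trial division (only soundness of members needed)
theorem pvPasses_of_TD (n : Int) (primes : List Int)
    (hmem : ∀ p ∈ primes, 2 ≤ p) (htd : pvTD n) : pvPasses n primes = true := by
  induction primes with
  | nil => rfl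
  | cons p rest ih =>
    rw [pvPasses]
    split
    · rfl
    · rename_i hle
      have hp2 : 2 ≤ p := hmem p (by simp)
      have : ¬ p ∣ n := htd p hp2 (by omega)
      rw [if_neg, ih (fun q hq => hmem q (by simp [hq]))]
      simp only [beq_iff_eq, PySem.Int.mod_eq_zero_iff_dvd]
      exact this

-- passes = false when some listed prime q with q*q ≤ n divides n (list sorted ascending,
-- so the break at p*p > n cannot skip q)
theorem pvPasses_eq_false (n q : Int) (primes : List Int)
    (hsort : primes.Pairwise (· < ·)) (hmem : ∀ p ∈ primes, 2 ≤ p)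
    (hq : q ∈ primes) (hqq : q * q ≤ n) (hdvd : q ∣ n) :
    pvPasses n primes = false := by
  induction primes with
  | nil => simp at hq
  | cons p rest ih =>
    rw [List.pairwise_cons] at hsort
    have hp2 : 2 ≤ p := hmem p (by simp)
    have hple : p * p ≤ n := by
      rcases List.mem_cons.mp hq with h | h
      · exact h ▸ hqq
      · have hpq : p < q := hsort.1 q h
        have hq2 : 2 ≤ q := hmem q (by simp [h])
        nlinarith
    rw [pvPasses, if_neg (by omega)]
    rcases List.mem_cons.mp hq with h | h
    · subst h
      rw [if_pos]
      simp only [beq_iff_eq, PySem.Int.mod_eq_zero_iff_dvd]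
      exact hdvd
    · split
      · rfl
      · exact ih hsort.2 (fun x hx => hmem x (by simp [hx])) h

-- any witness divisor yields a trial-division-prime witness divisor (its least prime factor)
theorem pv_least_factor (n d : Int) (h2 : 2 ≤ d) (hdd : d * d ≤ n) (hdvd : d ∣ n) :
    ∃ q : Int, 2 ≤ q ∧ pvTD q ∧ q ≤ d ∧ q * q ≤ n ∧ q ∣ n := by
  have hd1 : d.toNat ≠ 1 := by omega
  have hp : Nat.Prime (Nat.minFac d.toNat) := Nat.minFac_prime hd1
  refine ⟨(Nat.minFac d.toNat : Int), ?_, ?_, ?_, ?_, ?_⟩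
  · exact_mod_cast hp.two_le
  · intro e he hee hed
    have he0 : 0 ≤ e := by omega
    have hed' : (e.toNat : Int) ∣ (Nat.minFac d.toNat : Int) := by
      rwa [Int.toNat_of_nonneg he0]
    have : e.toNat ∣ Nat.minFac d.toNat := Int.natCast_dvd_natCast.mp hed'
    have := (Nat.Prime.eq_one_or_self_of_dvd hp e.toNat this)
    have heq : e = (Nat.minFac d.toNat : Int) := by omega
    subst heq
    nlinarith [hp.two_le]
  · have := Nat.minFac_le (show 0 < d.toNat by omega)
    omega
  · have hle : (Nat.minFac d.toNat : Int) ≤ d := by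
      have := Nat.minFac_le (show 0 < d.toNat by omega); omega
    nlinarith [hp.two_le]
  · have : (Nat.minFac d.toNat : Int) ∣ d := by
      have := Nat.minFac_dvd d.toNat
      have h := Int.natCast_dvd_natCast.mpr this
      rwa [Int.toNat_of_nonneg (by omega : (0:Int) ≤ d)] at h
    exact this.trans hdvd

theorem pvPasses_iff (n : Int) (primes : List Int)
    (hsort : primes.Pairwise (· < ·))
    (hmem : ∀ p ∈ primes, 2 ≤ p ∧ pvTD p)
    (hcomp : ∀ q : Int, 2 ≤ q → pvTD q → q * q ≤ n → q ∈ primes) :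
    pvPasses n primes = true ↔ pvTD n := by
  constructor
  · intro h
    by_contra htd
    rw [pvTD] at htd
    push Not at htd
    obtain ⟨d, hd2, hdd, hdvd⟩ := htd
    obtain ⟨q, hq2, hqtd, _, hqq, hqdvd⟩ := pv_least_factor n d hd2 hdd hdvd
    have hqmem : q ∈ primes := hcomp q hq2 hqtd hqq
    rw [pvPasses_eq_false n q primes hsort (fun p hp => (hmem p hp).1) hqmem hqq hqdvd] at h
    exact Bool.false_ne_true h
  · exact pvPasses_of_TD n primes (fun p hp => (hmem p hp).1)

-- invariant of the prime-list building fold: exactly the trial-division primes below b, ascending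
theorem pvBuild_inv (b : Int) (hb : 2 ≤ b) :
    let P := (PySem.List.pyRange 2 b 1).foldl
      (fun primes c => if pvPasses c primes then primes ++ [c] else primes) []
    (∀ p : Int, p ∈ P ↔ 2 ≤ p ∧ p < b ∧ pvTD p) ∧ P.Pairwise (· < ·) := by
  intro P
  have key : ∀ (k : Nat) (b : Int), b = 2 + k →
      let Q := (PySem.List.pyRange 2 b 1).foldl
        (fun primes c => if pvPasses c primes then primes ++ [c] else primes) []
      (∀ p : Int, p ∈ Q ↔ 2 ≤ p ∧ p < b ∧ pvTD p) ∧ Q.Pairwise (· < ·) := by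
    intro k
    induction k with
    | zero =>
      intro b hbe Q
      have : PySem.List.pyRange 2 b 1 = [] := PySem.List.pyRange_one_eq_nil (by omega)
      simp only [Q, this, List.foldl_nil]
      exact ⟨fun p => by simp; omega, List.Pairwise.nil⟩
    | succ k ih =>
      intro b hbe Q
      have hsplit : PySem.List.pyRange 2 b 1 = PySem.List.pyRange 2 (b-1) 1 ++ [b-1] := by
        have := PySem.List.pyRange_one_succ_right (a := 2) (b := b - 1) (by omega)
        simpa using this
      obtain ⟨hmem, hsort⟩ := ih (b-1) (by omega)
      set Q0 := (PySem.List.pyRange 2 (b-1) 1).foldl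
        (fun primes c => if pvPasses c primes then primes ++ [c] else primes) [] with hQ0
      have hQ : Q = if pvPasses (b-1) Q0 then Q0 ++ [b-1] else Q0 := by
        rw [hQ0]
        simp only [Q, hsplit, List.foldl_append, List.foldl_cons, List.foldl_nil]
      by_cases htd : pvTD (b-1)
      · have hpass : pvPasses (b-1) Q0 = true :=
          pvPasses_of_TD _ _ (fun p hp => ((hmem p).mp hp).1) htd
        rw [hQ, if_pos hpass]
        constructor
        · intro p
          rw [List.mem_append, hmem p]
          simp only [List.mem_singleton]
          constructor
          · rintro (⟨h1, h2, h3⟩ | rfl)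
            · exact ⟨h1, by omega, h3⟩
            · exact ⟨by omega, by omega, htd⟩
          · rintro ⟨h1, h2, h3⟩
            by_cases hlt : p < b - 1
            · exact Or.inl ⟨h1, hlt, h3⟩
            · exact Or.inr (by omega)
        · refine List.pairwise_append.mpr ⟨hsort, List.pairwise_singleton _ _, ?_⟩
          intro x hx y hy
          rw [hmem x] at hx
          simp only [List.mem_singleton] at hy
          omega
      · have hpass : pvPasses (b-1) Q0 = true ↔ pvTD (b-1) := by
          apply pvPasses_iff (b-1) Q0 hsort (fun p hp => (hmem p).mp hp |>.imp id (fun h => h.2))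
          intro q hq2 hqtd hqq
          rw [hmem q]
          refine ⟨hq2, by nlinarith, hqtd⟩
        rw [hQ, if_neg (by simp [hpass, htd] : ¬ pvPasses (b-1) Q0 = true)]
        refine ⟨fun p => ?_, hsort⟩
        rw [hmem p]
        constructor
        · rintro ⟨h1, h2, h3⟩; exact ⟨h1, by omega, h3⟩
        · rintro ⟨h1, h2, h3⟩
          refine ⟨h1, ?_, h3⟩
          by_contra hge
          have : p = b - 1 := by omega
          exact htd (this ▸ h3)
  exact key (b - 2).toNat b (by omega)

-- the step function of A's loop changes nothing on values below 2
theorem pv_foldl_small (l : List Int) (init : Int) (h : ∀ n ∈ l, n < 2) :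
    l.foldl
      (fun sum_of_squares number =>
        if pvIsPrimeA number && !(PySem.Int.mod number 3 == 0) && !(PySem.Int.mod number 5 == 0)
        then sum_of_squares + number ^ 2 else sum_of_squares) init = init := by
  induction l generalizing init with
  | nil => rfl
  | cons x t ih =>
    rw [List.foldl_cons, pvIsPrimeA_lt x (h x (by simp))]
    simp only [Bool.false_and, if_neg (Bool.false_ne_true)]
    exact ih init (fun n hn => h n (by simp [hn]))

-- ===== VERDICT (by name: the statement is the Claim_ definition above) =====
theorem sum_of_squares_prime_numbers_spec : Claim_equal_sum_of_squares_prime_numbers := by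
  intro numbers _
  unfold Spec_sum_of_squares_prime_numbers
  unfold sum_of_squares_prime_numbers sum_of_squares_prime_numbers_alt
  cases hmax : PySem.List.max? numbers (fun x => x) with
  | none =>
    have hnil : numbers = [] := (PySem.List.max?_eq_none_iff numbers _).mp hmax
    subst hnil
    simp
  | some v =>
    have hub : ∀ y ∈ numbers, y ≤ v := by
      intro y hy
      exact PySem.List.max?_isMax hmax y hy
    simp only []
    by_cases hv : v < 2
    · rw [if_pos hv]
      exact pv_foldl_small numbers 0 (fun n hn => lt_of_le_of_lt (hub n hn) hv)
    · rw [if_neg hv]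
      have hv2 : 2 ≤ v := by omega
      have hr : pvIsqrtLoop v 1 = (Nat.sqrt v.toNat : Int) :=
        pvIsqrtLoop_eq v 1 (by omega) (by omega)
      have hr1 : 1 ≤ (Nat.sqrt v.toNat : Int) :=
        (pv_sq_le_iff v 1 (by omega) (by omega)).mp (by omega)
      rw [hr]
      obtain ⟨hmem, hsort⟩ := pvBuild_inv ((Nat.sqrt v.toNat : Int) + 1) (by omega)
      set primes := (PySem.List.pyRange 2 ((Nat.sqrt v.toNat : Int) + 1) 1).foldl
        (fun primes c => if pvPasses c primes then primes ++ [c] else primes) [] with hP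
      apply PySem.List.foldl_congr_mem
      intro acc n hn
      by_cases h2 : 2 ≤ n
      · have hpass : pvPasses n primes = true ↔ pvTD n := by
          apply pvPasses_iff n primes hsort (fun p hp => ((hmem p).mp hp).imp id (fun h => h.2))
          intro q hq2 hqtd hqq
          rw [hmem q]
          have hqv : q * q ≤ v := le_trans hqq (hub n hn)
          have := (pv_sq_le_iff v q (by omega) (by omega)).mp hqv
          exact ⟨hq2, by omega, hqtd⟩
        have hA := pvIsPrimeA_eq n h2
        have heq : pvIsPrimeA n = pvPasses n primes := by
          rw [Bool.eq_iff_iff, hA, hpass]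
        have hd : decide (n ≥ 2) = true := by simp [h2]
        rw [heq, hd]
        cases pvPasses n primes <;>
          cases (!(PySem.Int.mod n 3 == 0)) <;>
          cases (!(PySem.Int.mod n 5 == 0)) <;>
          simp [pow_two]
      · rw [pvIsPrimeA_lt n (by omega), decide_eq_false (by omega : ¬ n ≥ 2)]
        simp
  -- end
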